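-- pv_equiv track=rewrite | github.com/Source-Python-Dev-Team/Source.Python | addons/source-python/packages/source-python/menus/radio.py | _slots_to_bin
-- ===== SOURCE A (Python) =====
-- def _slots_to_bin(slots):
--     """Convert an iterable of slots to the binary slot representation.
--
--     :param iterable slots: Slots that should be enabled.
--     :raise ValueError: Raised if a slot is out of range.
--     """
--     # Keys are enabled in that order: 0987654321
--     buffer = list('0000000000')
--     for slot in slots:
--         if 0 <= slot <= 9:
--             buffer[~(slot - 1)] = '1'
--         else:
--             raise ValueError('Slot out of range: {}'.format(slot))
--
--     return int(''.join(buffer), 2)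
-- ===== SOURCE B (Python) =====
-- def _slots_to_bin(slots):
--     """Convert an iterable of slots to the binary slot representation.
--
--     Two staged passes: validate everything first, then sum the distinct
--     powers of two (distinct slots map to distinct bits, so the sum of the
--     deduplicated powers equals the bitmask).
--     """
--     slots = list(slots)
--     for slot in slots:
--         if not 0 <= slot <= 9:
--             raise ValueError('Slot out of range: {}'.format(slot))
--     return sum(1 << ((slot + 9) % 10) for slot in set(slots))
-- ===== Notes on version B (the rewrite author's own statement) =====
-- stated objective: alternative
-- what changed: B validates all slots in a first pass, then deduplicates them with a set and returns the SUM of the distinct powers of two 1 << ((slot+9) % 10) (distinct slots give distinct bits, so the sum equals the mask), instead of A's single pass that mutates a 10-char '0'/'1' buffer in place and re-parses it with int(''.join(buffer), 2).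
import Mathlib
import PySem

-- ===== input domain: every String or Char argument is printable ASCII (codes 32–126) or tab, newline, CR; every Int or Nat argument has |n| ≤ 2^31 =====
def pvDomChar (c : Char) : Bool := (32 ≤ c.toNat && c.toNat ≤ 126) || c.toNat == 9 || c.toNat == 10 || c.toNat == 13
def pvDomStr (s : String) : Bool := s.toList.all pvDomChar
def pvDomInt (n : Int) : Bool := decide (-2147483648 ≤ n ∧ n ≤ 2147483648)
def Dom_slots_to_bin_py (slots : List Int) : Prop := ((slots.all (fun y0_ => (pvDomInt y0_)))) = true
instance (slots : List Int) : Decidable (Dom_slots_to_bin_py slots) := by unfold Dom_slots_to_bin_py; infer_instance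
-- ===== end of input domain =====

-- B replaces A's in-place char-buffer + int(...,2) parse by validate-all first, then
-- sum the deduplicated powers of two (alternative decomposition).

-- ===== PORT A =====
-- one step of A's loop body: buffer[~(slot - 1)] = '1'  (Python negative index: add len = 10)
def pvSetSlot (buf : List Char) (s : Int) : List Char :=
  let i : Int := Int.not (s - 1)
  let pos : Int := if i < 0 then i + 10 else i
  buf.set pos.toNat '1'

-- A's for-loop; none = the ValueError branch
def pvALoop : List Int → List Char → Option (List Char)
  | [], buf => some buf
  | s :: rest, buf =>
      if 0 ≤ s ∧ s ≤ 9 then pvALoop rest (pvSetSlot buf s) else none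

-- int(''.join(buffer), 2): exact for strings of '0'/'1' digits, which buffer always is
def pvBinVal (buf : List Char) : Int :=
  buf.foldl (fun a c => 2 * a + (if c = '1' then 1 else 0)) 0

def slots_to_bin_py (slots : List Int) : Int :=
  match pvALoop slots ['0','0','0','0','0','0','0','0','0','0'] with
  | some buf => pvBinVal buf
  | none => 0   -- ValueError: excluded by Pre_

-- ===== PORT B =====
-- B's validation pass, then sum of 1 << ((slot+9) % 10) over set(slots)
-- (sum over a PySem.Set is order-independent, so iterating its list is exact).
def slots_to_bin_py_alt (slots : List Int) : Int :=
  if slots.all (fun s => decide (0 ≤ s ∧ s ≤ 9)) then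
    ((PySem.Set.ofList slots).map
        (fun s => (1 : Int) <<< (PySem.Int.mod (s + 9) 10).toNat)).foldl (· + ·) 0
  else 0   -- ValueError: excluded by Pre_

-- ===== PRECONDITION & SPEC =====
-- Pre_ excludes exactly the inputs on which A raises ValueError: a slot outside 0..9.
def Pre_slots_to_bin_py (slots : List Int) : Prop := ∀ s ∈ slots, 0 ≤ s ∧ s ≤ 9
instance (slots : List Int) : Decidable (Pre_slots_to_bin_py slots) := by
  unfold Pre_slots_to_bin_py; infer_instance

def pvWitness_slots_to_bin_py : List Int := [0, 1, 9, 1]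

def Spec_slots_to_bin_py (slots : List Int) (out : Int) : Prop := out = slots_to_bin_py_alt slots
instance (slots : List Int) (out : Int) : Decidable (Spec_slots_to_bin_py slots out) := by
  unfold Spec_slots_to_bin_py; infer_instance

-- ===== CLAIM (what is proved, stated in full; the proofs are below) =====
def Claim_equal_slots_to_bin_py : Prop := ∀ (slots : List Int), Dom_slots_to_bin_py slots → Pre_slots_to_bin_py slots → Spec_slots_to_bin_py slots (slots_to_bin_py slots)

-- ===== LEMMAS AND PROOFS =====

-- the bit exponent B assigns to slot s
def pvExp (s : Int) : Nat := (PySem.Int.mod (s + 9) 10).toNat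

-- bit k of a '0'/'1' buffer
def pvBit (buf : List Char) (k : Nat) : Prop := buf[k]? = some '1'

lemma pvExp_lt (s : Int) (h0 : 0 ≤ s) (h9 : s ≤ 9) : pvExp s < 10 := by
  interval_cases s <;> decide

lemma pvExp_inj (s t : Int) (hs0 : 0 ≤ s) (hs9 : s ≤ 9) (ht0 : 0 ≤ t) (ht9 : t ≤ 9)
    (h : pvExp s = pvExp t) : s = t := by
  interval_cases s <;> interval_cases t <;> revert h <;> decide

-- A's buffer write: buffer[~(s-1)] = '1' is setting index 9 - pvExp s
lemma pvSetSlot_eq (s : Int) (h0 : 0 ≤ s) (h9 : s ≤ 9) (buf : List Char) :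
    pvSetSlot buf s = buf.set (9 - pvExp s) '1' := by
  interval_cases s <;> rfl

-- split off pvBinVal's accumulator
lemma pvBinVal_shift : ∀ (buf : List Char) (a : Int),
    buf.foldl (fun a c => 2 * a + (if c = '1' then 1 else 0)) a
      = a * 2 ^ buf.length + pvBinVal buf := by
  intro buf
  induction buf with
  | nil => intro a; simp [pvBinVal]
  | cons c rest ih =>
    intro a
    simp only [List.foldl_cons, List.length_cons, pvBinVal] at *
    rw [ih (2 * a + _), ih (2 * 0 + _)]
    ring

lemma pvBinVal_cons (c : Char) (rest : List Char) :
    pvBinVal (c :: rest) = (if c = '1' then 1 else 0) * 2 ^ rest.length + pvBinVal rest := by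
  show rest.foldl _ _ = _
  rw [pvBinVal_shift]
  ring

-- setting a clear bit adds its power of two
lemma pvBinVal_set : ∀ (buf : List Char) (k : Nat), k < buf.length → ¬ pvBit buf k →
    pvBinVal (buf.set k '1') = pvBinVal buf + 2 ^ (buf.length - 1 - k) := by
  intro buf
  induction buf with
  | nil => intro k hk; simp at hk
  | cons c rest ih =>
    intro k hk hbit
    cases k with
    | zero =>
      have hc : c ≠ '1' := by
        intro h; exact hbit (by simp [pvBit, h])
      have hlen : (c :: rest).length - 1 - 0 = rest.length := by simp
      rw [List.set_cons_zero, pvBinVal_cons, pvBinVal_cons, if_neg hc, if_pos rfl, hlen]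
      ring
    | succ k =>
      have hk' : k < rest.length := by simpa using hk
      have hbit' : ¬ pvBit rest k := by
        intro h; exact hbit (by simpa [pvBit] using h)
      simp only [List.set_cons_succ, pvBinVal_cons, List.length_set, List.length_cons]
      rw [ih k hk' hbit']
      have : rest.length + 1 - 1 - (k + 1) = rest.length - 1 - k := by omega
      rw [this]
      ring

lemma pvShift_eq (n : Nat) : (1 : Int) <<< n = 2 ^ n := by
  rw [Int.shiftLeft_eq]
  ring

-- A's loop is a foldl of pvSetSlot when every slot is in range
lemma pvALoop_foldl : ∀ (slots : List Int) (buf : List Char),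
    (∀ s ∈ slots, 0 ≤ s ∧ s ≤ 9) →
    pvALoop slots buf = some (slots.foldl pvSetSlot buf) := by
  intro slots
  induction slots with
  | nil => intro buf _; simp [pvALoop]
  | cons s rest ih =>
    intro buf hpre
    have hs := hpre s List.mem_cons_self
    simp only [pvALoop, if_pos hs, List.foldl_cons]
    exact ih _ fun t ht => hpre t (List.mem_cons_of_mem s ht)

lemma pvLen_foldl : ∀ (slots : List Int) (buf : List Char),
    (∀ s ∈ slots, 0 ≤ s ∧ s ≤ 9) →
    (slots.foldl pvSetSlot buf).length = buf.length := by
  intro slots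
  induction slots with
  | nil => intro buf _; rfl
  | cons s rest ih =>
    intro buf hpre
    have hs := hpre s List.mem_cons_self
    simp only [List.foldl_cons]
    rw [ih _ fun t ht => hpre t (List.mem_cons_of_mem s ht),
      pvSetSlot_eq s hs.1 hs.2, List.length_set]

lemma pvChars_foldl : ∀ (slots : List Int) (buf : List Char),
    (∀ s ∈ slots, 0 ≤ s ∧ s ≤ 9) → (∀ c ∈ buf, c = '0' ∨ c = '1') →
    ∀ c ∈ slots.foldl pvSetSlot buf, c = '0' ∨ c = '1' := by
  intro slots
  induction slots with
  | nil => intro buf _ hc; exact hc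
  | cons s rest ih =>
    intro buf hpre hc
    have hs := hpre s List.mem_cons_self
    simp only [List.foldl_cons]
    refine ih _ (fun t ht => hpre t (List.mem_cons_of_mem s ht)) ?_
    rw [pvSetSlot_eq s hs.1 hs.2]
    intro c hcm
    rcases List.mem_or_eq_of_mem_set hcm with h | h
    · exact hc c h
    · right; exact h

-- which bits are set after the foldl: old bits plus one bit per slot
lemma pvBits_foldl : ∀ (slots : List Int) (buf : List Char),
    (∀ s ∈ slots, 0 ≤ s ∧ s ≤ 9) → buf.length = 10 →
    ∀ k, k < 10 →
      (pvBit (slots.foldl pvSetSlot buf) k ↔ (∃ s ∈ slots, 9 - pvExp s = k) ∨ pvBit buf k) := by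
  intro slots
  induction slots with
  | nil => intro buf _ _ k _; simp
  | cons s rest ih =>
    intro buf hpre hlen k hk
    have hs := hpre s List.mem_cons_self
    have hrest : ∀ t ∈ rest, 0 ≤ t ∧ t ≤ 9 := fun t ht => hpre t (List.mem_cons_of_mem s ht)
    simp only [List.foldl_cons]
    rw [pvSetSlot_eq s hs.1 hs.2]
    have hlen' : (buf.set (9 - pvExp s) '1').length = 10 := by rw [List.length_set]; exact hlen
    rw [ih _ hrest hlen' k hk]
    by_cases hks : k = 9 - pvExp s
    · subst hks
      have hidx : 9 - pvExp s < buf.length := by rw [hlen]; omega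
      constructor
      · intro _; exact Or.inl ⟨s, List.mem_cons_self, rfl⟩
      · intro _
        right
        simp [pvBit, List.getElem?_set_self hidx]
    · have hne : (buf.set (9 - pvExp s) '1')[k]? = buf[k]? :=
        List.getElem?_set_ne (by omega)
      unfold pvBit
      rw [hne]
      constructor
      · rintro (⟨t, ht, hkt⟩ | hb)
        · exact Or.inl ⟨t, List.mem_cons_of_mem s ht, hkt⟩
        · exact Or.inr hb
      · rintro (⟨t, ht, hkt⟩ | hb)
        · rcases List.mem_cons.mp ht with rfl | ht'
          · exact absurd hkt.symm hks
          · exact Or.inl ⟨t, ht', hkt⟩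
        · exact Or.inr hb

-- two '0'/'1' buffers of length 10 with the same bits are equal
lemma pvExt (b1 b2 : List Char) (h1 : b1.length = 10) (h2 : b2.length = 10)
    (hc1 : ∀ c ∈ b1, c = '0' ∨ c = '1') (hc2 : ∀ c ∈ b2, c = '0' ∨ c = '1')
    (hb : ∀ k, k < 10 → (pvBit b1 k ↔ pvBit b2 k)) : b1 = b2 := by
  apply List.ext_getElem (by omega)
  intro i hi1 hi2
  have hi : i < 10 := by omega
  have e1 : b1[i]? = some b1[i] := List.getElem?_eq_getElem hi1
  have e2 : b2[i]? = some b2[i] := List.getElem?_eq_getElem hi2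
  have hbi := hb i hi
  unfold pvBit at hbi
  rw [e1, e2] at hbi
  rcases hc1 b1[i] (List.getElem_mem hi1) with d1 | d1 <;>
    rcases hc2 b2[i] (List.getElem_mem hi2) with d2 | d2 <;>
      simp_all

lemma pvFoldl_add_shift (l : List Int) (a : Int) : l.foldl (· + ·) a = a + l.foldl (· + ·) 0 := by
  induction l generalizing a with
  | nil => simp
  | cons x xs ih => simp only [List.foldl_cons]; rw [ih (a + x), ih (0 + x)]; ring

-- value of the foldl over a nodup list whose bits are all clear in buf
lemma pvVal_foldl : ∀ (d : List Int) (buf : List Char), buf.length = 10 →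
    (∀ s ∈ d, 0 ≤ s ∧ s ≤ 9) → d.Nodup →
    (∀ s ∈ d, ¬ pvBit buf (9 - pvExp s)) →
    pvBinVal (d.foldl pvSetSlot buf)
      = pvBinVal buf
          + (d.map (fun s => (1 : Int) <<< (PySem.Int.mod (s + 9) 10).toNat)).foldl (· + ·) 0 := by
  intro d
  induction d with
  | nil => intro buf _ _ _ _; simp [pvBinVal]
  | cons s rest ih =>
    intro buf hlen hpre hnd hclear
    have hs := hpre s List.mem_cons_self
    have hrest : ∀ t ∈ rest, 0 ≤ t ∧ t ≤ 9 := fun t ht => hpre t (List.mem_cons_of_mem s ht)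
    have hnotmem : s ∉ rest := (List.nodup_cons.mp hnd).1
    have hexp := pvExp_lt s hs.1 hs.2
    have hidx : 9 - pvExp s < buf.length := by omega
    have hstep : pvBinVal (pvSetSlot buf s) = pvBinVal buf + 2 ^ pvExp s := by
      rw [pvSetSlot_eq s hs.1 hs.2,
        pvBinVal_set buf (9 - pvExp s) hidx (hclear s List.mem_cons_self)]
      congr 2
      omega
    have hclear' : ∀ t ∈ rest, ¬ pvBit (pvSetSlot buf s) (9 - pvExp t) := by
      intro t ht
      have htb := hrest t ht
      have hexpt := pvExp_lt t htb.1 htb.2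
      have hne : pvExp t ≠ pvExp s := by
        intro h
        exact hnotmem ((pvExp_inj t s htb.1 htb.2 hs.1 hs.2 h) ▸ ht)
      rw [pvSetSlot_eq s hs.1 hs.2]
      unfold pvBit
      rw [List.getElem?_set_ne (by omega)]
      exact hclear t (List.mem_cons_of_mem s ht)
    simp only [List.foldl_cons, List.map_cons]
    rw [ih (pvSetSlot buf s)
        (by rw [pvSetSlot_eq s hs.1 hs.2, List.length_set]; exact hlen)
        hrest (List.nodup_cons.mp hnd).2 hclear', hstep]
    conv_rhs => rw [pvFoldl_add_shift]
    simp only [pvShift_eq, pvExp]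
    ring

lemma pvInit_props :
    (['0','0','0','0','0','0','0','0','0','0'] : List Char).length = 10 ∧
    (∀ c ∈ (['0','0','0','0','0','0','0','0','0','0'] : List Char), c = '0' ∨ c = '1') ∧
    (∀ k, ¬ pvBit (['0','0','0','0','0','0','0','0','0','0'] : List Char) k) ∧
    pvBinVal (['0','0','0','0','0','0','0','0','0','0'] : List Char) = 0 := by
  refine ⟨rfl, ?_, ?_, by decide⟩
  · intro c hc; simp at hc; simp [hc]
  · intro k h
    unfold pvBit at h
    have : '1' ∈ (['0','0','0','0','0','0','0','0','0','0'] : List Char) :=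
      List.mem_of_getElem? h
    simp at this

theorem pv_main (slots : List Int) (hpre : Pre_slots_to_bin_py slots) :
    slots_to_bin_py slots = slots_to_bin_py_alt slots := by
  obtain ⟨hlen0, hc0, hbit0, hval0⟩ := pvInit_props
  set buf0 : List Char := ['0','0','0','0','0','0','0','0','0','0'] with hbuf0
  have hall : slots.all (fun s => decide (0 ≤ s ∧ s ≤ 9)) = true := by
    simp only [List.all_eq_true, decide_eq_true_eq]; exact hpre
  have hdpre : ∀ s ∈ PySem.Set.ofList slots, 0 ≤ s ∧ s ≤ 9 := fun s hsm =>
    hpre s ((PySem.Set.mem_ofList slots s).mp hsm)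
  -- the two foldls produce the same buffer
  have hsame : slots.foldl pvSetSlot buf0 = (PySem.Set.ofList slots).foldl pvSetSlot buf0 := by
    apply pvExt _ _ (by rw [pvLen_foldl slots buf0 hpre]; exact hlen0)
      (by rw [pvLen_foldl _ buf0 hdpre]; exact hlen0)
      (pvChars_foldl slots buf0 hpre hc0) (pvChars_foldl _ buf0 hdpre hc0)
    intro k hk
    rw [pvBits_foldl slots buf0 hpre hlen0 k hk,
      pvBits_foldl _ buf0 hdpre hlen0 k hk]
    constructor
    · rintro (⟨s, hsm, hse⟩ | hb)
      · exact Or.inl ⟨s, (PySem.Set.mem_ofList slots s).mpr hsm, hse⟩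
      · exact Or.inr hb
    · rintro (⟨s, hsm, hse⟩ | hb)
      · exact Or.inl ⟨s, (PySem.Set.mem_ofList slots s).mp hsm, hse⟩
      · exact Or.inr hb
  have hval := pvVal_foldl (PySem.Set.ofList slots) buf0 hlen0 hdpre
    (PySem.Set.nodup_ofList slots) (fun s _ => hbit0 _)
  unfold slots_to_bin_py slots_to_bin_py_alt
  rw [pvALoop_foldl slots buf0 hpre, if_pos hall]
  simp only
  rw [hsame, hval, hval0, zero_add]

-- ===== VERDICT (by name: the statement is the Claim_ definition above) =====
theorem slots_to_bin_py_spec : Claim_equal_slots_to_bin_py := by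
  intro slots _ hpre
  unfold Spec_slots_to_bin_py
  exact pv_main slots hpre
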